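-- pv_equiv track=rewrite | github.com/jgorset/django-respite | respite/utils.py | parse_http_accept_header
-- ===== SOURCE A (Python) =====
-- def parse_http_accept_header(header):
--     """
--     Return a list of content types listed in the HTTP Accept header
--     ordered by quality.
--
--     Arguments:
--     header -- A string describing the contents of the HTTP Accept header.
--     """
--     components = header.split(',')
--
--     l = []
--     for component in components:
--         if ';' in component:
--             subcomponents = component.split(';')
--             l.append(
--                 (
--                     subcomponents[0], # eg. 'text/html'
--                     subcomponents[1][2:] # eg. 'q=0.9'
--                 )
--             )
--         else:
--             l.append((component, '1'))
--
--     l.sort(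
--         key = lambda i: i[1],
--         reverse = True
--     )
--
--     content_types = []
--     for i in l:
--         content_types.append(i[0])
--
--     return content_types
-- ===== SOURCE B (Python) =====
-- def _parse(component):
--     """Return (quality, content_type) for one Accept-header component."""
--     if ';' in component:
--         subcomponents = component.split(';')
--         return subcomponents[1][2:], subcomponents[0]
--     return '1', component
--
--
-- def parse_http_accept_header(header):
--     """
--     Return a list of content types listed in the HTTP Accept header
--     ordered by quality.
--
--     Arguments:
--     header -- A string describing the contents of the HTTP Accept header.
--     """
--     buckets = {}
--     for component in header.split(','):
--         quality, content_type = _parse(component)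
--         buckets.setdefault(quality, []).append(content_type)
--     return [t for q in sorted(buckets, reverse=True) for t in buckets[q]]
-- ===== Notes on version B (the rewrite author's own statement) =====
-- stated objective: alternative
-- what changed: Instead of building the full (type, quality) pair list, stable-sorting it and extracting, B parses each component with a helper into (quality, type), groups the types into per-quality dict buckets in one pass, and flattens the buckets over the distinct quality strings sorted descending, relying on dict insertion order for ties.
import Mathlib
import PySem

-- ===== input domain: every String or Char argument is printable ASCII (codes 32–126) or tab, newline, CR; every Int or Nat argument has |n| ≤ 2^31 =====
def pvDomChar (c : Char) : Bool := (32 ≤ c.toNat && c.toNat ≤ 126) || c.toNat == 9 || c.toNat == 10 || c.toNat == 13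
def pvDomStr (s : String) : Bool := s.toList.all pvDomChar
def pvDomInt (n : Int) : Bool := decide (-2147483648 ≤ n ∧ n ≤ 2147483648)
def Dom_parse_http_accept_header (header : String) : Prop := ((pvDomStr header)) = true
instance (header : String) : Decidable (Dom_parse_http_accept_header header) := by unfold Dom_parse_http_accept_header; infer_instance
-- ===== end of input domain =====

-- B parses each component with a helper into (quality, type), groups the types into per-quality dict
-- buckets, and flattens the buckets over the sorted distinct qualities, instead of stable-sorting the
-- whole pair list (objective: alternative).

-- ===== PORT A =====
-- ',' and ';' are non-empty separators, so Python's split never raises ((split? …).getD [] is always some);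
-- under the «';' in component» guard the split has ≥ 2 parts, so subcomponents[0]/[1] are in range (getD "" unreachable).
def parse_http_accept_header (header : String) : List String :=
  let components := (PySem.Str.split? header ",").getD []
  let l := components.foldl (fun l component =>
    if PySem.Str.isIn ";" component then
      let subcomponents := (PySem.Str.split? component ";").getD []
      l ++ [(subcomponents.getD 0 "",                                     -- eg. 'text/html'
             PySem.Str.slice (subcomponents.getD 1 "") (some 2) none)]   -- subcomponents[1][2:]
    else
      l ++ [(component, "1")]) []
  let sortedL := PySem.List.sorted l (fun i => i.2) true
  sortedL.foldl (fun content_types i => content_types ++ [i.1]) []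

-- ===== PORT B =====
-- _parse in Source B: (quality, content_type) of one component
def pvAltParse (component : String) : String × String :=
  if PySem.Str.isIn ";" component then
    let subcomponents := (PySem.Str.split? component ";").getD []
    (PySem.Str.slice (subcomponents.getD 1 "") (some 2) none, subcomponents.getD 0 "")
  else
    ("1", component)

-- the `for component in header.split(','): buckets.setdefault(...).append(...)` loop, as structural recursion
def pvAltBuckets : List String → PySem.Dict String (List String) → PySem.Dict String (List String)
  | [], buckets => buckets
  | component :: rest, buckets =>
      pvAltBuckets rest
        (buckets.modify (pvAltParse component).1 [] (fun ts => ts ++ [(pvAltParse component).2]))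

def parse_http_accept_header_alt (header : String) : List String :=
  let buckets := pvAltBuckets ((PySem.Str.split? header ",").getD []) PySem.Dict.empty
  -- [t for q in sorted(buckets, reverse=True) for t in buckets[q]]
  ((PySem.List.sorted buckets.keys (fun q => q) true).map (fun q => buckets.getD q [])).flatten

-- ===== PRECONDITION & SPEC =====
def Spec_parse_http_accept_header (header : String) (out : List String) : Prop := out = parse_http_accept_header_alt header
instance (header : String) (out : List String) : Decidable (Spec_parse_http_accept_header header out) := by unfold Spec_parse_http_accept_header; infer_instance

-- ===== CLAIM (what is proved, stated in full; the proofs are below) =====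
def Claim_equal_parse_http_accept_header : Prop := ∀ (header : String), Dom_parse_http_accept_header header → Spec_parse_http_accept_header header (parse_http_accept_header header)

-- ===== LEMMAS AND PROOFS =====

-- the per-component parse A performs inline, as (content_type, quality)
def pvParse (component : String) : String × String :=
  if PySem.Str.isIn ";" component then
    ((((PySem.Str.split? component ";").getD []).getD 0 ""),
     PySem.Str.slice (((PySem.Str.split? component ";").getD []).getD 1 "") (some 2) none)
  else
    (component, "1")

theorem pvAltParse_eq (c : String) : pvAltParse c = ((pvParse c).2, (pvParse c).1) := by
  simp only [pvAltParse, pvParse]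
  split <;> rfl

theorem pvAltBuckets_eq (cs : List String) (d : PySem.Dict String (List String)) :
    pvAltBuckets cs d
      = cs.foldl (fun d c => d.modify (pvParse c).2 [] (fun ts => ts ++ [(pvParse c).1])) d := by
  induction cs generalizing d with
  | nil => rfl
  | cons c cs ih => simp only [pvAltBuckets, pvAltParse_eq, List.foldl_cons, ih]

-- insert a fresh-or-present key into a strictly descending key list (names the position insertBy reaches)
def pvIdesc {κ : Type} [LinearOrder κ] (v : κ) : List κ → List κ
  | [] => [v]
  | k :: K => if k < v then v :: k :: K else if k = v then k :: K else k :: pvIdesc v K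

theorem pvIdesc_perm {κ : Type} [LinearOrder κ] (v : κ) (K : List κ) (hv : v ∉ K) :
    (pvIdesc v K).Perm (v :: K) := by
  induction K with
  | nil => simp [pvIdesc]
  | cons k K ih =>
    simp only [pvIdesc]
    split_ifs with h1 h2
    · exact List.Perm.refl _
    · exact absurd (h2 ▸ List.mem_cons_self) hv
    · exact (List.Perm.cons k (ih (fun h => hv (List.mem_cons_of_mem _ h)))).trans
        (List.Perm.swap v k K)

theorem pvIdesc_mem {κ : Type} [LinearOrder κ] (v : κ) (K : List κ) (b : κ) :
    b ∈ pvIdesc v K ↔ b = v ∨ b ∈ K := by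
  induction K with
  | nil => simp [pvIdesc]
  | cons k K ih =>
    simp only [pvIdesc]
    split_ifs with h1 h2
    · simp [List.mem_cons]
    · subst h2; simp [List.mem_cons]
    · simp [List.mem_cons, ih]; tauto

theorem pvIdesc_eq_of_mem {κ : Type} [LinearOrder κ] (v : κ) (K : List κ)
    (hK : K.Pairwise (fun a b => b < a)) (hv : v ∈ K) : pvIdesc v K = K := by
  induction K with
  | nil => cases hv
  | cons k K ih =>
    simp only [pvIdesc]
    rcases List.mem_cons.mp hv with h | h
    · subst h; simp
    · have hlt : v < k := (List.pairwise_cons.mp hK).1 v h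
      rw [if_neg (not_lt_of_gt hlt), if_neg (ne_of_gt hlt), ih (List.pairwise_cons.mp hK).2 h]

theorem pvIdesc_pairwise {κ : Type} [LinearOrder κ] (v : κ) (K : List κ)
    (hK : K.Pairwise (fun a b => b < a)) : (pvIdesc v K).Pairwise (fun a b => b < a) := by
  induction K with
  | nil => simp [pvIdesc]
  | cons k K ih =>
    obtain ⟨hk, hK'⟩ := List.pairwise_cons.mp hK
    simp only [pvIdesc]
    split_ifs with h1 h2
    · exact List.pairwise_cons.mpr ⟨fun b hb => by
        rcases List.mem_cons.mp hb with rfl | hb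
        · exact h1
        · exact (hk b hb).trans h1, hK⟩
    · exact hK
    · refine List.pairwise_cons.mpr ⟨fun b hb => ?_, ih hK'⟩
      rcases (pvIdesc_mem v K b).mp hb with rfl | hb
      · exact lt_of_le_of_ne (le_of_not_gt h1) (Ne.symm h2) |>.trans_le (le_refl k) |> (fun h => h)
      · exact hk b hb

theorem pvInsertBy_all {α : Type} (before : α → α → Bool) (x : α) (L : List α)
    (h : ∀ y ∈ L, before x y = true) :
    PySem.List.insertBy before x L = x :: L := by
  cases L with
  | nil => rfl
  | cons y ys => simp [PySem.List.insertBy, h y (List.mem_cons_self)]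

theorem pvInsertBy_append_none {α : Type} (before : α → α → Bool) (x : α) (P L : List α)
    (h : ∀ y ∈ P, before x y = false) :
    PySem.List.insertBy before x (P ++ L) = P ++ PySem.List.insertBy before x L := by
  induction P with
  | nil => rfl
  | cons p P ih =>
    simp only [List.cons_append, PySem.List.insertBy, h p List.mem_cons_self]
    simp only [Bool.false_eq_true, if_false]
    rw [ih (fun y hy => h y (List.mem_cons_of_mem _ hy))]

theorem pvFlatMap_congr {α β : Type} (l : List α) (f g : α → List β)
    (h : ∀ a ∈ l, f a = g a) : l.flatMap f = l.flatMap g := by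
  induction l with
  | nil => rfl
  | cons a l ih =>
    simp only [List.flatMap_cons, h a List.mem_cons_self,
      ih (fun b hb => h b (List.mem_cons_of_mem _ hb))]

-- the key step: inserting x into a bucket-flattened list lands at the end of its own bucket
theorem pvInsertBy_flatMap {α κ : Type} [LinearOrder κ] (key : α → κ) (x : α) (K : List κ)
    (B : κ → List α)
    (hB : ∀ k, ∀ a ∈ B k, key a = k)
    (hK : K.Pairwise (fun a b => b < a))
    (hv : key x ∉ K → B (key x) = []) :
    PySem.List.insertBy (fun a b => decide (key b < key a)) x (K.flatMap B)
      = (pvIdesc (key x) K).flatMap (fun k => if k = key x then B k ++ [x] else B k) := by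
  induction K with
  | nil =>
    simp only [List.flatMap_nil, pvIdesc, List.flatMap_cons, List.append_nil,
      hv (List.not_mem_nil), List.nil_append]
    rfl
  | cons k K ih =>
    obtain ⟨hk, hK'⟩ := List.pairwise_cons.mp hK
    have hKlt : ∀ y ∈ K.flatMap B, key y < k := by
      intro y hy
      obtain ⟨k', hk', hy'⟩ := List.mem_flatMap.mp hy
      rw [hB k' y hy']; exact hk k' hk'
    simp only [List.flatMap_cons]
    rcases lt_trichotomy k (key x) with hlt | heq | hgt
    · have hvout : key x ∉ k :: K := by
        intro h
        rcases List.mem_cons.mp h with h | h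
        · exact (ne_of_lt hlt) h.symm
        · exact lt_irrefl _ ((hk _ h).trans hlt)
      rw [pvInsertBy_all _ _ _ (by
        intro y hy
        rcases List.mem_append.mp hy with hy | hy
        · simpa using (hB k y hy) ▸ hlt
        · simpa using (hKlt y hy).trans hlt)]
      have hBv : B (key x) = [] := hv hvout
      simp only [pvIdesc, if_pos hlt, List.flatMap_cons, hBv, List.nil_append,
        if_neg (ne_of_lt hlt)]
      rw [pvFlatMap_congr K (fun k' => if k' = key x then B k' ++ [x] else B k') B
        (fun k' hk' => by exact if_neg (ne_of_lt ((hk k' hk').trans hlt)))]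
      simp
    · subst heq
      rw [pvInsertBy_append_none _ _ _ _ (by
        intro y hy; simp [hB _ y hy])]
      rw [pvInsertBy_all _ _ _ (by intro y hy; simp [hKlt y hy])]
      rw [show pvIdesc (key x) (key x :: K) = key x :: K by simp [pvIdesc]]
      simp only [List.flatMap_cons]
      rw [pvFlatMap_congr K (fun k' => if k' = key x then B k' ++ [x] else B k') B
        (fun k' hk' => by exact if_neg (ne_of_lt (hk k' hk')))]
      simp
    · rw [pvInsertBy_append_none _ _ _ _ (by
        intro y hy; simp [hB _ y hy, not_lt_of_gt hgt])]
      have hv' : key x ∉ K → B (key x) = [] := fun h =>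
        hv (by simp [List.mem_cons, h, ne_of_lt hgt])
      rw [ih hK' hv']
      simp only [pvIdesc, if_neg (not_lt_of_gt hgt), List.flatMap_cons,
        if_neg (ne_of_gt hgt)]

theorem pvSorted_rev_ofList_pairwise_gt {κ : Type} [LinearOrder κ] [BEq κ] [LawfulBEq κ]
    (xs : List κ) :
    (PySem.List.sorted (PySem.Set.ofList xs) (fun k => k) true).Pairwise (fun a b => b < a) := by
  have h1 := PySem.List.sorted_pairwise_rev (PySem.Set.ofList xs) (fun k => k)
  have h2 : (PySem.List.sorted (PySem.Set.ofList xs) (fun k => k) true).Nodup :=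
    ((PySem.List.sorted_perm (PySem.Set.ofList xs) (fun k => k) true).nodup_iff).mpr
      (PySem.Set.nodup_ofList xs)
  exact (h1.and h2).imp (fun ⟨hle, hne⟩ => lt_of_le_of_ne hle (Ne.symm hne))

theorem pvSorted_keys_step {κ : Type} [LinearOrder κ] [BEq κ] [LawfulBEq κ] (l : List κ) (v : κ) :
    PySem.List.sorted (PySem.Set.ofList (l ++ [v])) (fun k => k) true
      = pvIdesc v (PySem.List.sorted (PySem.Set.ofList l) (fun k => k) true) := by
  rw [PySem.Set.ofList_append_singleton]
  by_cases hv : v ∈ PySem.Set.ofList l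
  · rw [PySem.Set.add_of_mem hv,
      pvIdesc_eq_of_mem v _ (pvSorted_rev_ofList_pairwise_gt l)
        ((PySem.List.mem_sorted _ _ _ v).mpr hv)]
  · rw [PySem.Set.add_of_not_mem hv]
    refine PySem.List.sorted_rev_eq_of_perm_of_pairwise_gt _ _ _ ?_ ?_
    · refine ((pvIdesc_perm v _ (fun h => hv ((PySem.List.mem_sorted _ _ _ v).mp h))).trans ?_)
      exact (List.Perm.cons v (PySem.List.sorted_perm _ _ _)).trans
        (List.perm_append_singleton v _).symm
    · exact pvIdesc_pairwise v _ (pvSorted_rev_ofList_pairwise_gt l)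

-- main characterization: a stable descending key-sort is the flattening of its key buckets
theorem pvSorted_rev_eq_flatMap {α κ : Type} [LinearOrder κ] [BEq κ] [LawfulBEq κ]
    (key : α → κ) (ps : List α) :
    PySem.List.sorted ps key true
      = (PySem.List.sorted (PySem.Set.ofList (ps.map key)) (fun k => k) true).flatMap
          (fun k => ps.filter (fun a => key a == k)) := by
  induction ps using List.reverseRecOn with
  | nil => rfl
  | append_singleton ps x ih =>
    rw [PySem.List.sorted_rev_eq_foldl_insertBy, List.foldl_append, List.foldl_cons,
      List.foldl_nil, ← PySem.List.sorted_rev_eq_foldl_insertBy, ih]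
    rw [pvInsertBy_flatMap key x _ _
      (fun k a ha => by
        have := (List.mem_filter.mp ha).2
        exact eq_of_beq this)
      (pvSorted_rev_ofList_pairwise_gt _)
      (fun hnot => by
        rw [List.filter_eq_nil_iff]
        intro a ha hbeq
        exact hnot (((PySem.List.mem_sorted _ _ _ _).mpr
          ((PySem.Set.mem_ofList _ _).mpr
            (List.mem_map.mpr ⟨a, ha, eq_of_beq hbeq⟩)))))]
    rw [List.map_append, List.map_singleton, pvSorted_keys_step]
    refine pvFlatMap_congr _ _ _ (fun k _ => ?_)
    by_cases hk : k = key x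
    · subst hk
      simp [List.filter_append]
    · rw [if_neg hk]
      have : (key x == k) = false := beq_eq_false_iff_ne.mpr (Ne.symm hk)
      simp [List.filter_append, this]

theorem pvKeys (cs : List String) :
    (cs.foldl (fun d c => d.modify (pvParse c).2 [] (fun ts => ts ++ [(pvParse c).1]))
        PySem.Dict.empty).keys
      = PySem.Set.ofList (cs.map (fun c => (pvParse c).2)) := by
  rw [PySem.Dict.keys_foldl_modify_key cs (fun c => (pvParse c).2) []
    (fun _ c v => v ++ [(pvParse c).1]) PySem.Dict.empty]
  rw [PySem.Dict.keys_empty, PySem.Set.update_nil_left]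

theorem pvBucket (cs : List String) (k : String) :
    ((cs.foldl (fun d c => d.modify (pvParse c).2 [] (fun ts => ts ++ [(pvParse c).1]))
        PySem.Dict.empty).getD k [])
      = (cs.filter (fun c => (pvParse c).2 == k)).map (fun c => (pvParse c).1) := by
  have h := PySem.Dict.getD_foldl_modify_append
    (cs.map (fun c => ((pvParse c).2, (pvParse c).1))) PySem.Dict.empty k
  rw [List.foldl_map] at h
  simpa [List.filter_map, List.map_map, Function.comp, PySem.Dict.getD_empty] using h

theorem portA_eq (header : String) :
    parse_http_accept_header header
      = (PySem.List.sorted (((PySem.Str.split? header ",").getD []).map pvParse)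
          (fun i => i.2) true).map (fun i => i.1) := by
  simp only [parse_http_accept_header]
  rw [show (fun (l : List (String × String)) (component : String) =>
      if PySem.Str.isIn ";" component then
        let subcomponents := (PySem.Str.split? component ";").getD []
        l ++ [(subcomponents.getD 0 "", PySem.Str.slice (subcomponents.getD 1 "") (some 2) none)]
      else l ++ [(component, "1")])
      = (fun l component => l ++ [pvParse component]) by
    funext l component
    simp only [pvParse]
    split <;> rfl]
  rw [PySem.List.foldl_append_singleton_eq_map pvParse _ [], List.nil_append,
    PySem.List.foldl_append_singleton_eq_map (fun (i : String × String) => i.1) _ [],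
    List.nil_append]

theorem portB_eq (header : String) :
    parse_http_accept_header_alt header
      = (PySem.List.sorted
          (PySem.Set.ofList ((((PySem.Str.split? header ",").getD []).map pvParse).map (fun i => i.2)))
          (fun k => k) true).flatMap
          (fun k => ((((PySem.Str.split? header ",").getD []).map pvParse).filter
              (fun a => a.2 == k)).map (fun i => i.1)) := by
  simp only [parse_http_accept_header_alt]
  rw [pvAltBuckets_eq, ← List.flatMap_def, pvKeys]
  have hm : ((((PySem.Str.split? header ",").getD []).map pvParse).map (fun i => i.2))
      = (((PySem.Str.split? header ",").getD []).map (fun c => (pvParse c).2)) := by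
    rw [List.map_map]; rfl
  rw [hm]
  refine pvFlatMap_congr _ _ _ (fun k _ => ?_)
  rw [pvBucket, List.filter_map, List.map_map]
  rfl

-- ===== VERDICT (by name: the statement is the Claim_ definition above) =====
theorem parse_http_accept_header_spec : Claim_equal_parse_http_accept_header := by
  intro header _
  unfold Spec_parse_http_accept_header
  rw [portA_eq, portB_eq, pvSorted_rev_eq_flatMap, List.map_flatMap]
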